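-- pv_equiv track=rewrite | github.com/jerukan/PyPlume | pyplume/dataloaders.py | guess_ocean_coords
-- ===== SOURCE A (Python) =====
-- def _remove_redundant_maps(mapping):
--     mapping_copy = {}
--     for k, v in mapping.items():
--         if k != v:
--             mapping_copy[k] = v
--     return mapping_copy
--
-- COORD_MAPPINGS = {
--     "depth": {"depth", "z"},
--     "lat": {"lat", "latitude", "y"},
--     "lon": {"lon", "longitude", "long", "x"},
--     "time": {"time", "t"},
-- }
--
-- def guess_ocean_coords(keys, exclude=None):
--     if exclude is None:
--         exclude = []
--     mappings = {}
--     checked = set()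
--     for key in keys:
--         for target, possible in COORD_MAPPINGS.items():
--             if (
--                 target not in exclude
--                 and key.lower() in possible
--                 and target not in checked
--             ):
--                 mappings[target] = key
--                 checked.add(target)
--     return _remove_redundant_maps(mappings)
-- ===== SOURCE B (Python) =====
-- _REVERSE = {
--     "depth": "depth", "z": "depth",
--     "lat": "lat", "latitude": "lat", "y": "lat",
--     "lon": "lon", "longitude": "lon", "long": "lon", "x": "lon",
--     "time": "time", "t": "time",
-- }
--
-- def guess_ocean_coords(keys, exclude=None):
--     if exclude is None:
--         exclude = []
--     found = {}
--     for key in keys: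
--         target = _REVERSE.get(key.lower())
--         if target is not None and target not in exclude and target not in found:
--             found[target] = key
--     return {t: k for t, k in found.items() if t != k}
-- ===== Notes on version B (the rewrite author's own statement) =====
-- stated objective: idiomatic
-- what changed: Replaced the nested loop over COORD_MAPPINGS (with a separate 'checked' set and a second dict-rebuilding pass that drops k==v entries) by a single pass using a precomputed reverse alias->target dict lookup per key, with the identity pairs filtered once at the end; per key, B tests membership in the exclude list at most once (only on a lookup hit) where A scans it for every target.
import Mathlib
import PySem

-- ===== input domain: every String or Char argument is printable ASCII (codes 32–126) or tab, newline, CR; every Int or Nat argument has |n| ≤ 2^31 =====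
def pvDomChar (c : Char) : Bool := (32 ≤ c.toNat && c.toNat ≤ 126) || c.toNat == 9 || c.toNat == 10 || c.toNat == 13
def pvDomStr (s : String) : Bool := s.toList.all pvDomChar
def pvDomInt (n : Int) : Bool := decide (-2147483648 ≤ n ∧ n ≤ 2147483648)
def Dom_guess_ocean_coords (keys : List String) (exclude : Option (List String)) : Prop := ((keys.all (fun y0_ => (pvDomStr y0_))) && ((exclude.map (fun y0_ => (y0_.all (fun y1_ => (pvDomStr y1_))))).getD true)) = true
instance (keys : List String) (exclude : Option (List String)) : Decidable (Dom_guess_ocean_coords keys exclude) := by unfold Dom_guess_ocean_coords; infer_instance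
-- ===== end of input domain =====

-- B replaces A's nested loop over COORD_MAPPINGS (with a separate `checked` set and a
-- redundancy-removal pass rebuilding the dict) by a single pass with one reverse-lookup
-- dict per key, filtering the identity pairs at the end; objective: more idiomatic.

-- ===== PORT A =====
def pvCoordMappings : List (String × PySem.Set String) :=
  [("depth", PySem.Set.ofList ["depth", "z"]),
   ("lat",   PySem.Set.ofList ["lat", "latitude", "y"]),
   ("lon",   PySem.Set.ofList ["lon", "longitude", "long", "x"]),
   ("time",  PySem.Set.ofList ["time", "t"])]

-- _remove_redundant_maps: rebuild the dict keeping only pairs with k != v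
def pvRemoveRedundantMaps (mapping : PySem.Dict String String) : PySem.Dict String String :=
  mapping.items.foldl
    (fun acc kv => if kv.1 ≠ kv.2 then acc.insert kv.1 kv.2 else acc) PySem.Dict.empty

def guess_ocean_coords (keys : List String) (exclude : Option (List String)) : List (String × String) :=
  let excl := exclude.getD []
  let st := keys.foldl
    (fun (st : PySem.Dict String String × PySem.Set String) key =>
      pvCoordMappings.foldl
        (fun st tp =>
          if (!excl.contains tp.1 && PySem.Set.contains tp.2 (PySem.Str.lower key)
               && !PySem.Set.contains st.2 tp.1)
          then (st.1.insert tp.1 key, PySem.Set.add st.2 tp.1)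
          else st)
        st)
    (PySem.Dict.empty, PySem.Set.empty)
  (pvRemoveRedundantMaps st.1).items

-- ===== PORT B =====
def pvReverse : PySem.Dict String String := PySem.Dict.ofList
  [("depth", "depth"), ("z", "depth"),
   ("lat", "lat"), ("latitude", "lat"), ("y", "lat"),
   ("lon", "lon"), ("longitude", "lon"), ("long", "lon"), ("x", "lon"),
   ("time", "time"), ("t", "time")]

def guess_ocean_coords_alt (keys : List String) (exclude : Option (List String)) : List (String × String) :=
  let excl := exclude.getD []
  let found := keys.foldl
    (fun (found : PySem.Dict String String) key =>
      match pvReverse.get? (PySem.Str.lower key) with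
      | none => found
      | some t => if !excl.contains t && !found.contains t then found.insert t key else found)
    PySem.Dict.empty
  found.items.filter (fun kv => kv.1 ≠ kv.2)

-- ===== PRECONDITION & SPEC =====
def Spec_guess_ocean_coords (keys : List String) (exclude : Option (List String)) (out : List (String × String)) : Prop := out = guess_ocean_coords_alt keys exclude
instance (keys : List String) (exclude : Option (List String)) (out : List (String × String)) : Decidable (Spec_guess_ocean_coords keys exclude out) := by unfold Spec_guess_ocean_coords; infer_instance

-- ===== CLAIM (what is proved, stated in full; the proofs are below) =====
def Claim_equal_guess_ocean_coords : Prop := ∀ (keys : List String) (exclude : Option (List String)), Dom_guess_ocean_coords keys exclude → Spec_guess_ocean_coords keys exclude (guess_ocean_coords keys exclude)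

-- ===== LEMMAS AND PROOFS =====

-- shorthand for A's per-key inner loop and B's per-key step
def stepA (excl : List String) (key : String)
    (st : PySem.Dict String String × PySem.Set String) :
    PySem.Dict String String × PySem.Set String :=
  pvCoordMappings.foldl
    (fun st tp =>
      if (!excl.contains tp.1 && PySem.Set.contains tp.2 (PySem.Str.lower key)
           && !PySem.Set.contains st.2 tp.1)
      then (st.1.insert tp.1 key, PySem.Set.add st.2 tp.1)
      else st)
    st

def stepB (excl : List String) (key : String) (found : PySem.Dict String String) :
    PySem.Dict String String :=
  match pvReverse.get? (PySem.Str.lower key) with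
  | none => found
  | some t => if !excl.contains t && !found.contains t then found.insert t key else found

lemma step_eq (excl : List String) (key : String)
    (c : PySem.Set String) (found : PySem.Dict String String)
    (h2 : ∀ t, PySem.Set.contains c t = found.contains t) :
    (stepA excl key (found, c)).1 = stepB excl key found ∧
    (∀ t, PySem.Set.contains (stepA excl key (found, c)).2 t = (stepB excl key found).contains t) := by
  unfold stepA stepB
  have h2d : ∀ x, decide (x ∈ c) = found.contains x := by
    intro x; rw [← h2]; simp [PySem.Set.contains_eq_listContains]
  have h2' : ∀ x, x ∈ c ↔ found.contains x = true := by
    intro x; rw [← h2]; simp [PySem.Set.contains_eq_listContains]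
  by_cases ha0 : PySem.Str.lower key = "depth"
  · have hg : pvReverse.get? (PySem.Str.lower key) = some "depth" := by rw [ha0]; rfl
    rw [hg]
    by_cases hx : "depth" ∈ excl
    · simpa [pvCoordMappings, ha0, hx] using h2d
    by_cases hc : found.contains "depth"
    · simpa [pvCoordMappings, ha0, hx, hc, (h2' "depth").mpr hc] using h2d
    · simp [pvCoordMappings, ha0, hx, hc, fun x => (h2' x).not]
      intro t
      by_cases ht : t = "depth" <;> simp [ht, Bool.or_comm, h2d t, PySem.Dict.contains_insert]
  by_cases ha1 : PySem.Str.lower key = "z"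
  · have hg : pvReverse.get? (PySem.Str.lower key) = some "depth" := by rw [ha1]; rfl
    rw [hg]
    by_cases hx : "depth" ∈ excl
    · simpa [pvCoordMappings, ha1, hx] using h2d
    by_cases hc : found.contains "depth"
    · simpa [pvCoordMappings, ha1, hx, hc, (h2' "depth").mpr hc] using h2d
    · simp [pvCoordMappings, ha1, hx, hc, fun x => (h2' x).not]
      intro t
      by_cases ht : t = "depth" <;> simp [ht, Bool.or_comm, h2d t, PySem.Dict.contains_insert]
  by_cases ha2 : PySem.Str.lower key = "lat"
  · have hg : pvReverse.get? (PySem.Str.lower key) = some "lat" := by rw [ha2]; rfl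
    rw [hg]
    by_cases hx : "lat" ∈ excl
    · simpa [pvCoordMappings, ha2, hx] using h2d
    by_cases hc : found.contains "lat"
    · simpa [pvCoordMappings, ha2, hx, hc, (h2' "lat").mpr hc] using h2d
    · simp [pvCoordMappings, ha2, hx, hc, fun x => (h2' x).not]
      intro t
      by_cases ht : t = "lat" <;> simp [ht, Bool.or_comm, h2d t, PySem.Dict.contains_insert]
  by_cases ha3 : PySem.Str.lower key = "latitude"
  · have hg : pvReverse.get? (PySem.Str.lower key) = some "lat" := by rw [ha3]; rfl
    rw [hg]
    by_cases hx : "lat" ∈ excl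
    · simpa [pvCoordMappings, ha3, hx] using h2d
    by_cases hc : found.contains "lat"
    · simpa [pvCoordMappings, ha3, hx, hc, (h2' "lat").mpr hc] using h2d
    · simp [pvCoordMappings, ha3, hx, hc, fun x => (h2' x).not]
      intro t
      by_cases ht : t = "lat" <;> simp [ht, Bool.or_comm, h2d t, PySem.Dict.contains_insert]
  by_cases ha4 : PySem.Str.lower key = "y"
  · have hg : pvReverse.get? (PySem.Str.lower key) = some "lat" := by rw [ha4]; rfl
    rw [hg]
    by_cases hx : "lat" ∈ excl
    · simpa [pvCoordMappings, ha4, hx] using h2d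
    by_cases hc : found.contains "lat"
    · simpa [pvCoordMappings, ha4, hx, hc, (h2' "lat").mpr hc] using h2d
    · simp [pvCoordMappings, ha4, hx, hc, fun x => (h2' x).not]
      intro t
      by_cases ht : t = "lat" <;> simp [ht, Bool.or_comm, h2d t, PySem.Dict.contains_insert]
  by_cases ha5 : PySem.Str.lower key = "lon"
  · have hg : pvReverse.get? (PySem.Str.lower key) = some "lon" := by rw [ha5]; rfl
    rw [hg]
    by_cases hx : "lon" ∈ excl
    · simpa [pvCoordMappings, ha5, hx] using h2d
    by_cases hc : found.contains "lon"
    · simpa [pvCoordMappings, ha5, hx, hc, (h2' "lon").mpr hc] using h2d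
    · simp [pvCoordMappings, ha5, hx, hc, fun x => (h2' x).not]
      intro t
      by_cases ht : t = "lon" <;> simp [ht, Bool.or_comm, h2d t, PySem.Dict.contains_insert]
  by_cases ha6 : PySem.Str.lower key = "longitude"
  · have hg : pvReverse.get? (PySem.Str.lower key) = some "lon" := by rw [ha6]; rfl
    rw [hg]
    by_cases hx : "lon" ∈ excl
    · simpa [pvCoordMappings, ha6, hx] using h2d
    by_cases hc : found.contains "lon"
    · simpa [pvCoordMappings, ha6, hx, hc, (h2' "lon").mpr hc] using h2d
    · simp [pvCoordMappings, ha6, hx, hc, fun x => (h2' x).not]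
      intro t
      by_cases ht : t = "lon" <;> simp [ht, Bool.or_comm, h2d t, PySem.Dict.contains_insert]
  by_cases ha7 : PySem.Str.lower key = "long"
  · have hg : pvReverse.get? (PySem.Str.lower key) = some "lon" := by rw [ha7]; rfl
    rw [hg]
    by_cases hx : "lon" ∈ excl
    · simpa [pvCoordMappings, ha7, hx] using h2d
    by_cases hc : found.contains "lon"
    · simpa [pvCoordMappings, ha7, hx, hc, (h2' "lon").mpr hc] using h2d
    · simp [pvCoordMappings, ha7, hx, hc, fun x => (h2' x).not]
      intro t
      by_cases ht : t = "lon" <;> simp [ht, Bool.or_comm, h2d t, PySem.Dict.contains_insert]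
  by_cases ha8 : PySem.Str.lower key = "x"
  · have hg : pvReverse.get? (PySem.Str.lower key) = some "lon" := by rw [ha8]; rfl
    rw [hg]
    by_cases hx : "lon" ∈ excl
    · simpa [pvCoordMappings, ha8, hx] using h2d
    by_cases hc : found.contains "lon"
    · simpa [pvCoordMappings, ha8, hx, hc, (h2' "lon").mpr hc] using h2d
    · simp [pvCoordMappings, ha8, hx, hc, fun x => (h2' x).not]
      intro t
      by_cases ht : t = "lon" <;> simp [ht, Bool.or_comm, h2d t, PySem.Dict.contains_insert]
  by_cases ha9 : PySem.Str.lower key = "time"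
  · have hg : pvReverse.get? (PySem.Str.lower key) = some "time" := by rw [ha9]; rfl
    rw [hg]
    by_cases hx : "time" ∈ excl
    · simpa [pvCoordMappings, ha9, hx] using h2d
    by_cases hc : found.contains "time"
    · simpa [pvCoordMappings, ha9, hx, hc, (h2' "time").mpr hc] using h2d
    · simp [pvCoordMappings, ha9, hx, hc, fun x => (h2' x).not]
      intro t
      by_cases ht : t = "time" <;> simp [ht, Bool.or_comm, h2d t, PySem.Dict.contains_insert]
  by_cases ha10 : PySem.Str.lower key = "t"
  · have hg : pvReverse.get? (PySem.Str.lower key) = some "time" := by rw [ha10]; rfl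
    rw [hg]
    by_cases hx : "time" ∈ excl
    · simpa [pvCoordMappings, ha10, hx] using h2d
    by_cases hc : found.contains "time"
    · simpa [pvCoordMappings, ha10, hx, hc, (h2' "time").mpr hc] using h2d
    · simp [pvCoordMappings, ha10, hx, hc, fun x => (h2' x).not]
      intro t
      by_cases ht : t = "time" <;> simp [ht, Bool.or_comm, h2d t, PySem.Dict.contains_insert]
  have hg : pvReverse.get? (PySem.Str.lower key) = none := by
    rw [show pvReverse = PySem.Dict.mk [("depth", "depth"), ("z", "depth"), ("lat", "lat"),
        ("latitude", "lat"), ("y", "lat"), ("lon", "lon"), ("longitude", "lon"), ("long", "lon"),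
        ("x", "lon"), ("time", "time"), ("t", "time")] from rfl]
    simp [beq_eq_false_iff_ne.mpr (Ne.symm ha0), beq_eq_false_iff_ne.mpr (Ne.symm ha1), beq_eq_false_iff_ne.mpr (Ne.symm ha2), beq_eq_false_iff_ne.mpr (Ne.symm ha3), beq_eq_false_iff_ne.mpr (Ne.symm ha4), beq_eq_false_iff_ne.mpr (Ne.symm ha5), beq_eq_false_iff_ne.mpr (Ne.symm ha6), beq_eq_false_iff_ne.mpr (Ne.symm ha7), beq_eq_false_iff_ne.mpr (Ne.symm ha8), beq_eq_false_iff_ne.mpr (Ne.symm ha9), beq_eq_false_iff_ne.mpr (Ne.symm ha10), PySem.Dict.get?]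
  rw [hg]
  simpa [pvCoordMappings, PySem.Set.contains_eq_listContains, ha0, ha1, ha2, ha3, ha4, ha5, ha6, ha7, ha8, ha9, ha10] using h2d

lemma fold_eq (excl : List String) (keys : List String)
    (c : PySem.Set String) (found : PySem.Dict String String)
    (h2 : ∀ t, PySem.Set.contains c t = found.contains t) :
    (keys.foldl (fun st key => stepA excl key st) (found, c)).1 =
      keys.foldl (fun fd key => stepB excl key fd) found ∧
    (∀ t, PySem.Set.contains (keys.foldl (fun st key => stepA excl key st) (found, c)).2 t =
      (keys.foldl (fun fd key => stepB excl key fd) found).contains t) := by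
  induction keys generalizing c found with
  | nil => exact ⟨rfl, h2⟩
  | cons k ks ih =>
    obtain ⟨hA, hC⟩ := step_eq excl k c found h2
    have := ih (stepA excl k (found, c)).2 (stepB excl k found) (by
      intro t; rw [hC])
    simpa [List.foldl, ← hA] using this

lemma nodup_stepB (excl : List String) (key : String) (found : PySem.Dict String String)
    (h : found.keys.Nodup) : (stepB excl key found).keys.Nodup := by
  unfold stepB
  rcases hg : pvReverse.get? (PySem.Str.lower key) with _ | t
  · exact h
  · dsimp only
    split
    · exact PySem.Dict.nodup_keys_insert _ _ _ h
    · exact h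

lemma nodup_foldB (excl : List String) (keys : List String) (found : PySem.Dict String String)
    (h : found.keys.Nodup) :
    (keys.foldl (fun fd key => stepB excl key fd) found).keys.Nodup := by
  induction keys generalizing found with
  | nil => exact h
  | cons k ks ih => exact ih _ (nodup_stepB excl k found h)

lemma removeRedundant_items (l : List (String × String)) (d : PySem.Dict String String)
    (hnd : (l.map Prod.fst ++ d.keys).Nodup)
    (hfresh : ∀ p ∈ l, d.contains p.1 = false) :
    (l.foldl (fun acc kv => if kv.1 ≠ kv.2 then acc.insert kv.1 kv.2 else acc) d).items =
      d.items ++ l.filter (fun kv => kv.1 ≠ kv.2) := by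
  induction l generalizing d with
  | nil => simp
  | cons kv rest ih =>
    simp only [List.map_cons, List.cons_append, List.nodup_cons] at hnd
    have hf := hfresh kv (by simp)
    have hfr : ∀ p ∈ rest, d.contains p.1 = false := fun p hp => hfresh p (by simp [hp])
    by_cases h : kv.1 = kv.2
    · rw [List.foldl_cons, if_neg (by simp [h]), ih d hnd.2 hfr]
      simp [h]
    · rw [List.foldl_cons, if_pos (by simp [h]), ih (d.insert kv.1 kv.2) ?hnd' ?hfr']
      · rw [PySem.Dict.items_insert_of_not_contains _ _ hf]
        simp [h]
      case hnd' =>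
        rw [PySem.Dict.keys_insert_of_not_contains _ _ hf]
        rw [← List.append_assoc]
        exact (List.nodup_cons.mpr hnd).perm (List.perm_append_singleton _ _).symm
      case hfr' =>
        intro p hp
        rw [PySem.Dict.contains_insert]
        have hne : (p.1 == kv.1) = false := by
          refine beq_eq_false_iff_ne.mpr ?_
          intro hb
          have hm : p.1 ∈ List.map Prod.fst rest := List.mem_map_of_mem hp
          rw [hb] at hm
          exact hnd.1 (List.mem_append_left _ hm)
        simp only [Bool.or_eq_false_iff]
        exact ⟨hne, hfr p hp⟩

-- ===== VERDICT (by name: the statement is the Claim_ definition above) =====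
theorem guess_ocean_coords_spec : Claim_equal_guess_ocean_coords := by
  intro keys exclude _
  unfold Spec_guess_ocean_coords guess_ocean_coords guess_ocean_coords_alt
  have hfold := fold_eq (exclude.getD []) keys PySem.Set.empty PySem.Dict.empty
      (by intro t; rfl)
  have hnd := nodup_foldB (exclude.getD []) keys PySem.Dict.empty List.nodup_nil
  show (pvRemoveRedundantMaps (keys.foldl (fun st key => stepA (exclude.getD []) key st)
          (PySem.Dict.empty, PySem.Set.empty)).1).items =
      (keys.foldl (fun fd key => stepB (exclude.getD []) key fd)
          PySem.Dict.empty).items.filter (fun kv => decide (kv.1 ≠ kv.2))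
  rw [hfold.1]
  unfold pvRemoveRedundantMaps
  rw [removeRedundant_items _ _ (by simpa [PySem.Dict.empty, PySem.Dict.keys] using hnd)
        (fun p _ => rfl)]
  rfl
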